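-- pv_equiv track=rewrite | github.com/rdaly525/coreir | tools/check_equivalence.py | to_and
-- ===== SOURCE A (Python) =====
-- def to_and(lst):
--     if len(lst) == 1:
--         return lst[0]
--
--     ret = "(and %s %s)"%(lst[0], lst[1])
--     if len(lst) == 2:
--         return ret
--
--     for i in range(2,len(lst),1):
--         ret = "(and %s %s)"%(ret, lst[i])
--
--     return ret
-- ===== SOURCE B (Python) =====
-- def to_and(lst):
--     rest = lst[1:]
--     return "(and " * len(rest) + lst[0] + "".join(" " + x + ")" for x in rest)
-- ===== Notes on version B (the rewrite author's own statement) =====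
-- stated objective: faster
-- what changed: Replaced the iterative re-concatenation loop (which rebuilds the whole string each step) with a closed-form construction: all '(and ' prefixes emitted at once by string repetition plus a single join of ' <elem>)' suffixes.
import Mathlib
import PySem

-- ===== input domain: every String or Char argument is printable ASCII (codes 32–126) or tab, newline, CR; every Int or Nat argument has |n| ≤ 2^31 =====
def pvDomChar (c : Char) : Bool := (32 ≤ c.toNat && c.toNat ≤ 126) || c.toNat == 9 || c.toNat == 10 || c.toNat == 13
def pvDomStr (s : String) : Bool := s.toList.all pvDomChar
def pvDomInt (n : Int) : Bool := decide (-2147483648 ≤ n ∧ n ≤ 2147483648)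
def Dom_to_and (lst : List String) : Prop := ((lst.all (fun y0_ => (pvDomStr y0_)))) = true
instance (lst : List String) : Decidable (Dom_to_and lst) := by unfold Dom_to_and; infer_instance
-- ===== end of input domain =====

-- B builds the result in closed form (repeated '(and ' prefix + one join of ' <elem>)' suffixes)
-- instead of A's iterative re-concatenation; measured faster at scale.

-- ===== PORT A =====
def to_and (lst : List String) : String :=
  if lst.length == 1 then PySem.List.pyGetD lst 0 ""
  else
    let ret := "(and " ++ PySem.List.pyGetD lst 0 "" ++ " " ++ PySem.List.pyGetD lst 1 "" ++ ")"
    if lst.length == 2 then ret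
    else (PySem.List.pyRange 2 (lst.length : Int) 1).foldl
      (fun r i => "(and " ++ r ++ " " ++ PySem.List.pyGetD lst i "" ++ ")") ret

-- ===== PORT B =====
-- '"(and " * len(rest)' and '"".join(...)' are ported by hand as folds of '++' (exact:
-- Python string repetition / join of a list of strings).
def to_and_alt (lst : List String) : String :=
  let rest := PySem.List.slice lst (some 1) none
  (List.replicate rest.length "(and ").foldl (· ++ ·) ""
    ++ PySem.List.pyGetD lst 0 ""
    ++ (rest.map (fun x => " " ++ x ++ ")")).foldl (· ++ ·) ""

-- ===== PRECONDITION & SPEC =====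
-- Pre_ excludes only the empty list, on which Python A raises IndexError (lst[0]).
def Pre_to_and (lst : List String) : Prop := lst ≠ []
instance (lst : List String) : Decidable (Pre_to_and lst) := by unfold Pre_to_and; infer_instance
def pvWitness_to_and : List String := ["a", "b", "c"]

def Spec_to_and (lst : List String) (out : String) : Prop := out = to_and_alt lst
instance (lst : List String) (out : String) : Decidable (Spec_to_and lst out) := by unfold Spec_to_and; infer_instance

-- ===== CLAIM (what is proved, stated in full; the proofs are below) =====
def Claim_equal_to_and : Prop := ∀ (lst : List String), Dom_to_and lst → Pre_to_and lst → Spec_to_and lst (to_and lst)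

-- ===== LEMMAS AND PROOFS =====

-- the combining step of A's loop
def pvAnd (r s : String) : String := "(and " ++ r ++ " " ++ s ++ ")"

-- A on a nonempty list is the left fold of pvAnd over the tail
theorem to_and_eq_foldl (x : String) (xs : List String) :
    to_and (x :: xs) = xs.foldl pvAnd x := by
  match xs with
  | [] => simp [to_and, PySem.List.pyGetD_zero_cons]
  | [y] => simp [to_and, pvAnd, PySem.List.pyGetD]
  | y :: z :: rest =>
    unfold to_and
    have hlen : ((x :: y :: z :: rest).length == 1) = false := by simp
    have hlen2 : ((x :: y :: z :: rest).length == 2) = false := by simp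
    rw [hlen2, hlen]
    simp only [Bool.false_eq_true, if_false]
    have := PySem.List.foldl_pyRange_pyGetD' (x :: y :: z :: rest) "" pvAnd
      (pvAnd x y) (a := 2) (by omega)
    rw [PySem.List.pyGetD_zero_cons,
      show PySem.List.pyGetD (x :: y :: z :: rest) 1 "" = y by
        rw [PySem.List.pyGetD_ofNat' (x :: y :: z :: rest) 1 ""]; rfl]
    simp only [pvAnd] at this ⊢
    rw [this]
    simp [pvAnd]

-- fold of '++' with an arbitrary accumulator shifts out front
theorem foldl_append_shift (l : List String) (a : String) :
    l.foldl (· ++ ·) a = a ++ l.foldl (· ++ ·) "" := by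
  induction l generalizing a with
  | nil => simp [List.foldl, String.append_empty]
  | cons s t ih =>
    simp only [List.foldl]
    rw [ih (a ++ s), ih ("" ++ s), String.empty_append, String.append_assoc]

-- the repeated-prefix block commutes with one more copy of its atom
theorem repl_comm (n : Nat) (s : String) :
    (List.replicate n s).foldl (· ++ ·) "" ++ s
      = s ++ (List.replicate n s).foldl (· ++ ·) "" := by
  induction n with
  | zero => simp [String.append_empty, String.empty_append]
  | succ n ih =>
    rw [List.replicate_succ]
    simp only [List.foldl]
    rw [foldl_append_shift, String.empty_append, String.append_assoc, ih,
      ← String.append_assoc]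

-- the left fold of pvAnd has the closed form B computes
theorem foldl_pvAnd_closed (xs : List String) (x : String) :
    xs.foldl pvAnd x
      = (List.replicate xs.length "(and ").foldl (· ++ ·) "" ++ x
          ++ (xs.map (fun s => " " ++ s ++ ")")).foldl (· ++ ·) "" := by
  induction xs generalizing x with
  | nil => simp [String.append_empty, String.empty_append]
  | cons y t ih =>
    simp only [List.foldl, List.length_cons, List.replicate_succ, List.map_cons]
    rw [ih (pvAnd x y),
      foldl_append_shift (List.replicate t.length "(and ") ("" ++ "(and "),
      foldl_append_shift (t.map (fun s => " " ++ s ++ ")")) ("" ++ (" " ++ y ++ ")")),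
      String.empty_append, String.empty_append]
    simp only [pvAnd, String.append_assoc]
    rw [← String.append_assoc, repl_comm, String.append_assoc]

-- B on a nonempty list equals the same fold
theorem to_and_alt_eq_foldl (x : String) (xs : List String) :
    to_and_alt (x :: xs) = xs.foldl pvAnd x := by
  unfold to_and_alt
  rw [show PySem.List.slice (x :: xs) (some 1) none = xs by
        rw [PySem.List.slice_from_one]; rfl,
    PySem.List.pyGetD_zero_cons, foldl_pvAnd_closed]

-- ===== VERDICT (by name: the statement is the Claim_ definition above) =====
theorem to_and_spec : Claim_equal_to_and := by
  intro lst _ hpre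
  unfold Spec_to_and
  match lst with
  | [] => exact absurd rfl hpre
  | x :: xs => rw [to_and_eq_foldl, to_and_alt_eq_foldl]
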